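-- pv_equiv track=rewrite | github.com/yogesh-aipowered365/multi-model-design-suite | components/brand_compliance.py | compute_brand_compliance_score
-- ===== SOURCE A (Python) =====
-- from typing import Dict, List
--
-- def compute_brand_compliance_score(brand_rules: Dict, violations: List[Dict]) -> int:
--     """
--     Compute a brand compliance score (0-100) based on violations.
--
--     Args:
--         brand_rules: Normalized rules dict
--         violations: List of violations found
--
--     Returns:
--         Score 0-100
--     """
--     if not brand_rules or not brand_rules.get('rules'):
--         return 100  # No rules = compliant
--
--     total_rules = len(brand_rules.get('rules', []))
--     if total_rules == 0:
--         return 100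
--
--     # Count violations by priority
--     high_violations = sum(1 for v in violations if v.get('severity') == 'high')
--     medium_violations = sum(1 for v in violations if v.get('severity') == 'medium')
--     low_violations = sum(1 for v in violations if v.get('severity') == 'low')
--
--     # Calculate score: each high violation = -20pts, medium = -10pts, low = -5pts
--     penalty = (high_violations * 20) + (medium_violations * 10) + (low_violations * 5)
--     score = max(0, 100 - penalty)
--
--     return int(score)
-- ===== SOURCE B (Python) =====
-- def compute_brand_compliance_score(brand_rules, violations):
--     if not brand_rules or not brand_rules.get('rules'):
--         return 100
--     weights = {'high': 20, 'medium': 10, 'low': 5}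
--     penalty = 0
--     for v in violations:
--         penalty += weights.get(v.get('severity'), 0)
--     return max(0, 100 - penalty)
-- ===== Notes on version B (the rewrite author's own statement) =====
-- stated objective: simpler
-- what changed: Replaces three separate counting scans plus per-severity arithmetic with one pass over violations accumulating the penalty via a weight table, and drops the dead total_rules==0 guard.
import Mathlib
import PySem

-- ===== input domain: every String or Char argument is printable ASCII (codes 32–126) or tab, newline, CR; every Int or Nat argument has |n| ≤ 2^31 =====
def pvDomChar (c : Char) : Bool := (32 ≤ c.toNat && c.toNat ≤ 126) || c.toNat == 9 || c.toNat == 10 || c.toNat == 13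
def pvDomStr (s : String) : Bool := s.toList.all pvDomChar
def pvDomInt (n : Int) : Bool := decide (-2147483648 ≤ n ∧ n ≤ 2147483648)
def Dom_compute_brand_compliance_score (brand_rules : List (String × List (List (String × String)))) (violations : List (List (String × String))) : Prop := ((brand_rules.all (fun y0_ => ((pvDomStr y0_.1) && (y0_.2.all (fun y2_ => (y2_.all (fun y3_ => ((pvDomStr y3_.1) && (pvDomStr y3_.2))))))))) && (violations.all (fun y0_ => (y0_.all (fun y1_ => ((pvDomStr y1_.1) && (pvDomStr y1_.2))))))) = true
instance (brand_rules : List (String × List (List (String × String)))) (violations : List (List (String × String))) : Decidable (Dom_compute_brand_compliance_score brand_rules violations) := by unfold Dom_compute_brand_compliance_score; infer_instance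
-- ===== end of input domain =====

-- B replaces A's three separate counting scans with one pass driven by a weight table (objective: simpler).

-- ===== PORT A =====
def compute_brand_compliance_score (brand_rules : List (String × List (List (String × String)))) (violations : List (List (String × String))) : Int :=
  -- if not brand_rules or not brand_rules.get('rules'): return 100
  if brand_rules.isEmpty || (match (PySem.Dict.mk brand_rules).get? "rules" with
                             | none => true
                             | some rs => rs.isEmpty) then 100
  else
    let total_rules : Int := ((PySem.Dict.mk brand_rules).getD "rules" []).length
    if total_rules = 0 then 100
    else
      let high_violations : Int := violations.foldl (fun acc v => if (PySem.Dict.mk v).get? "severity" = some "high" then acc + 1 else acc) 0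
      let medium_violations : Int := violations.foldl (fun acc v => if (PySem.Dict.mk v).get? "severity" = some "medium" then acc + 1 else acc) 0
      let low_violations : Int := violations.foldl (fun acc v => if (PySem.Dict.mk v).get? "severity" = some "low" then acc + 1 else acc) 0
      let penalty := high_violations * 20 + medium_violations * 10 + low_violations * 5
      max 0 (100 - penalty)

-- ===== PORT B =====
def pvWeights : PySem.Dict String Int := PySem.Dict.mk [("high", 20), ("medium", 10), ("low", 5)]

def compute_brand_compliance_score_alt (brand_rules : List (String × List (List (String × String)))) (violations : List (List (String × String))) : Int :=
  if brand_rules.isEmpty || (match (PySem.Dict.mk brand_rules).get? "rules" with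
                             | none => true
                             | some rs => rs.isEmpty) then 100
  else
    let penalty := violations.foldl
      (fun p v => p + (match (PySem.Dict.mk v).get? "severity" with
                       | some s => pvWeights.getD s 0
                       | none => 0)) 0
    max 0 (100 - penalty)

-- ===== PRECONDITION & SPEC =====
def Spec_compute_brand_compliance_score (brand_rules : List (String × List (List (String × String)))) (violations : List (List (String × String))) (out : Int) : Prop := out = compute_brand_compliance_score_alt brand_rules violations
instance (brand_rules : List (String × List (List (String × String)))) (violations : List (List (String × String))) (out : Int) : Decidable (Spec_compute_brand_compliance_score brand_rules violations out) := by unfold Spec_compute_brand_compliance_score; infer_instance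

-- ===== CLAIM (what is proved, stated in full; the proofs are below) =====
def Claim_equal_compute_brand_compliance_score : Prop := ∀ (brand_rules : List (String × List (List (String × String)))) (violations : List (List (String × String))), Dom_compute_brand_compliance_score brand_rules violations → Spec_compute_brand_compliance_score brand_rules violations (compute_brand_compliance_score brand_rules violations)

-- ===== LEMMAS AND PROOFS =====

-- per-element: the weight-table contribution of one violation equals its contribution
-- to the three counters
lemma pv_weight_elem (v : List (String × String)) (p a b c : Int) :
    (p + (match (PySem.Dict.mk v).get? "severity" with
          | some s => pvWeights.getD s 0
          | none => (0:Int))) + 20 * a + 10 * b + 5 * c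
    = p + 20 * (if (PySem.Dict.mk v).get? "severity" = some "high" then a + 1 else a)
        + 10 * (if (PySem.Dict.mk v).get? "severity" = some "medium" then b + 1 else b)
        + 5 * (if (PySem.Dict.mk v).get? "severity" = some "low" then c + 1 else c) := by
  cases h : (PySem.Dict.mk v).get? "severity" with
  | none =>
    rw [if_neg (by decide), if_neg (by decide), if_neg (by decide)]
    ring
  | some s =>
    simp only [Option.some.injEq]
    by_cases h1 : s = "high"
    · subst h1
      rw [if_pos rfl, if_neg (by decide), if_neg (by decide),
          show pvWeights.getD "high" 0 = 20 from by decide]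
      ring
    · by_cases h2 : s = "medium"
      · subst h2
        rw [if_neg (by decide), if_pos rfl, if_neg (by decide),
            show pvWeights.getD "medium" 0 = 10 from by decide]
        ring
      · by_cases h3 : s = "low"
        · subst h3
          rw [if_neg (by decide), if_neg (by decide), if_pos rfl,
              show pvWeights.getD "low" 0 = 5 from by decide]
          ring
        · have b1 : (("high" : String) == s) = false := by simp; exact Ne.symm h1
          have b2 : (("medium" : String) == s) = false := by simp; exact Ne.symm h2
          have b3 : (("low" : String) == s) = false := by simp; exact Ne.symm h3
          have e : pvWeights.getD s 0 = 0 := by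
            simp [pvWeights, PySem.Dict.getD, PySem.Dict.get?, List.find?, b1, b2, b3]
          rw [if_neg h1, if_neg h2, if_neg h3, e]
          ring

-- the single weighted pass equals 20/10/5 times the three counting passes
lemma pv_fold_split (vs : List (List (String × String))) : ∀ (p a b c : Int),
    vs.foldl (fun p v => p + (match (PySem.Dict.mk v).get? "severity" with
                              | some s => pvWeights.getD s 0
                              | none => 0)) p
      + 20 * a + 10 * b + 5 * c
    = p + 20 * vs.foldl (fun acc v => if (PySem.Dict.mk v).get? "severity" = some "high" then acc + 1 else acc) a
        + 10 * vs.foldl (fun acc v => if (PySem.Dict.mk v).get? "severity" = some "medium" then acc + 1 else acc) b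
        + 5 * vs.foldl (fun acc v => if (PySem.Dict.mk v).get? "severity" = some "low" then acc + 1 else acc) c := by
  induction vs with
  | nil => intro p a b c; simp [List.foldl]
  | cons v tl ih =>
    intro p a b c
    simp only [List.foldl]
    have hih := ih (p + (match (PySem.Dict.mk v).get? "severity" with
                         | some s => pvWeights.getD s 0
                         | none => 0))
      (if (PySem.Dict.mk v).get? "severity" = some "high" then a + 1 else a)
      (if (PySem.Dict.mk v).get? "severity" = some "medium" then b + 1 else b)
      (if (PySem.Dict.mk v).get? "severity" = some "low" then c + 1 else c)
    have hw := pv_weight_elem v p a b c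
    linarith

theorem pv_core (brand_rules : List (String × List (List (String × String)))) (violations : List (List (String × String))) :
    compute_brand_compliance_score brand_rules violations
    = compute_brand_compliance_score_alt brand_rules violations := by
  unfold compute_brand_compliance_score compute_brand_compliance_score_alt
  by_cases hg : (brand_rules.isEmpty || (match (PySem.Dict.mk brand_rules).get? "rules" with
                                         | none => true
                                         | some rs => rs.isEmpty)) = true
  · simp [hg]
  · rw [if_neg hg, if_neg hg]
    rw [Bool.not_eq_true] at hg
    -- guard is false: get? "rules" = some rs with rs ≠ [], so total_rules ≠ 0
    rw [Bool.or_eq_false_iff] at hg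
    obtain ⟨-, hr⟩ := hg
    cases h : (PySem.Dict.mk brand_rules).get? "rules" with
    | none => rw [h] at hr; simp at hr
    | some rs =>
      rw [h] at hr
      have hrs : rs ≠ [] := by
        intro e; subst e; simp at hr
      have hget : (PySem.Dict.mk brand_rules).getD "rules" [] = rs := by
        rw [PySem.Dict.getD_eq_get?_getD, h]; rfl
      have hlen : ((rs.length : Int)) ≠ 0 := by
        simp [List.length_eq_zero_iff, hrs]
      simp only [hget, if_neg hlen]
      have := pv_fold_split violations 0 0 0 0
      simp only [mul_zero, add_zero] at this
      rw [this]
      congr 1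
      ring

-- ===== VERDICT (by name: the statement is the Claim_ definition above) =====
theorem compute_brand_compliance_score_spec : Claim_equal_compute_brand_compliance_score := by
  intro brand_rules violations _
  exact pv_core brand_rules violations
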